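-- pv_equiv track=rewrite | github.com/joan1821/PageCraftML | nn_server.py | find_desktop_resolution
-- ===== SOURCE A (Python) =====
-- from typing import Dict, Any, List, Optional, Tuple
--
-- def find_desktop_resolution(items_by_resolution: Dict[str, Any]) -> Optional[str]:
--     """
--     Find the desktop resolution key.
--     Desktop is typically the one with the most items or contains 'Desktop' in name.
--     """
--     desktop_candidates = []
--
--     for resolution, items in items_by_resolution.items():
--         if not isinstance(items, list):
--             continue
--
--         # Check if it's explicitly desktop
--         if 'Desktop' in resolution or 'desktop' in resolution.lower():
--             if items:  # Has items
--                 return resolution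
--             desktop_candidates.append((resolution, len(items)))
--         elif items:  # Has items but not explicitly desktop
--             desktop_candidates.append((resolution, len(items)))
--
--     # Return the resolution with the most items
--     if desktop_candidates:
--         desktop_candidates.sort(key=lambda x: x[1], reverse=True)
--         return desktop_candidates[0][0]
--
--     return None
-- ===== SOURCE B (Python) =====
-- def find_desktop_resolution(items_by_resolution):
--     """Staged passes: early return on first desktop-named resolution with items;
--     otherwise build eligible (resolution, count) pairs, take the max count,
--     and return the first resolution achieving it."""
--     pairs = [(r, it) for r, it in items_by_resolution.items() if isinstance(it, list)]
--     for r, it in pairs: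
--         if 'desktop' in r.lower() and it:
--             return r
--     counts = [(r, len(it)) for r, it in pairs if it or 'desktop' in r.lower()]
--     if not counts:
--         return None
--     best = max(n for _, n in counts)
--     for r, n in counts:
--         if n == best:
--             return r
-- ===== Notes on version B (the rewrite author's own statement) =====
-- stated objective: alternative
-- what changed: Replaces A's single loop that accumulates candidates and finally stable-sorts them descending by count with staged passes: a first scan returning the first non-empty desktop-named resolution, then a filtered count list, a plain max over the counts, and a scan for the first resolution attaining that max; A's redundant double substring test is folded into one 'desktop' in r.lower() check.
import Mathlib
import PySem

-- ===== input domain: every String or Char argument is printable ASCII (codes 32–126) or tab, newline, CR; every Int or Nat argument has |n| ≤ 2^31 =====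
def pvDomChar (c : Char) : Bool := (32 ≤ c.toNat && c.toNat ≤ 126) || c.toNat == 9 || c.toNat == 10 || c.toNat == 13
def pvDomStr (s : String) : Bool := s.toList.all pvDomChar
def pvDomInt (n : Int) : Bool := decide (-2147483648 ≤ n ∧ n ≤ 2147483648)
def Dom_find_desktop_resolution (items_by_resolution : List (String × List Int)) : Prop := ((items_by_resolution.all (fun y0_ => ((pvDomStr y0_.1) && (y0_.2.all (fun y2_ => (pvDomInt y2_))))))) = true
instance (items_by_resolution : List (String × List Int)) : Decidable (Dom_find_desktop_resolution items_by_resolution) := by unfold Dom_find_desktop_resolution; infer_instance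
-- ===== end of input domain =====

-- B replaces A's accumulate-then-stable-sort loop by staged passes (first desktop
-- hit, filtered counts, max, first attaining resolution); same return value.

-- ===== PORT A =====
-- A accumulates eligible (resolution, len(items)) candidates, returns early on a
-- desktop-named resolution with items, then stable-sorts candidates by count
-- descending and returns the first one's resolution.
-- (The 'isinstance(items, list)' guard is always true under the typed signature
--  List (String × List Int) and is therefore not ported.)
def find_desktop_resolution_go (l : List (String × List Int))
    (desktop_candidates : List (String × Int)) : Option String :=
  match l with
  | [] =>
      -- 'if desktop_candidates: sort desc by count (stable); return [0][0]' / 'return None'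
      match PySem.List.sorted desktop_candidates (fun x => x.2) true with
      | [] => none
      | c :: _ => some c.1
  | (resolution, items) :: rest =>
      if PySem.Str.isIn "Desktop" resolution
          || PySem.Str.isIn "desktop" (PySem.Str.lower resolution) then
        if items ≠ [] then some resolution
        else find_desktop_resolution_go rest
          (desktop_candidates ++ [(resolution, (items.length : Int))])
      else if items ≠ [] then
        find_desktop_resolution_go rest
          (desktop_candidates ++ [(resolution, (items.length : Int))])
      else
        find_desktop_resolution_go rest desktop_candidates

def find_desktop_resolution (items_by_resolution : List (String × List Int)) : Option String :=
  find_desktop_resolution_go items_by_resolution []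

-- ===== PORT B =====
-- 'desktop' in r.lower()
def altIsDesktop (r : String) : Bool := PySem.Str.isIn "desktop" (PySem.Str.lower r)

-- staged: first desktop-named pair with items; else eligible counts, their max,
-- and the first pair attaining it.
def find_desktop_resolution_alt (items_by_resolution : List (String × List Int)) : Option String :=
  match items_by_resolution.find? (fun p => altIsDesktop p.1 && decide (p.2 ≠ [])) with
  | some p => some p.1
  | none =>
    let counts := (items_by_resolution.filter
        (fun p => decide (p.2 ≠ []) || altIsDesktop p.1)).map
        (fun p => (p.1, (p.2.length : Int)))
    match PySem.List.max? (counts.map Prod.snd) (fun y => y) with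
    | none => none
    | some best => (counts.find? (fun p => p.2 == best)).map Prod.fst

-- ===== PRECONDITION & SPEC =====
def Spec_find_desktop_resolution (items_by_resolution : List (String × List Int)) (out : Option String) : Prop := out = find_desktop_resolution_alt items_by_resolution
instance (items_by_resolution : List (String × List Int)) (out : Option String) : Decidable (Spec_find_desktop_resolution items_by_resolution out) := by unfold Spec_find_desktop_resolution; infer_instance

-- ===== CLAIM (what is proved, stated in full; the proofs are below) =====
def Claim_equal_find_desktop_resolution : Prop := ∀ (items_by_resolution : List (String × List Int)), Dom_find_desktop_resolution items_by_resolution → Spec_find_desktop_resolution items_by_resolution (find_desktop_resolution items_by_resolution)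

-- ===== LEMMAS AND PROOFS =====

-- the eligible count list B builds (named for the proofs)
def eligCounts (l : List (String × List Int)) : List (String × Int) :=
  (l.filter (fun p => decide (p.2 ≠ []) || altIsDesktop p.1)).map
    (fun p => (p.1, (p.2.length : Int)))

-- B's tail stage as a function of an arbitrary count list
def stagedBest (cs : List (String × Int)) : Option (String × Int) :=
  match PySem.List.max? (cs.map Prod.snd) (fun y => y) with
  | none => none
  | some best => cs.find? (fun p => p.2 == best)

-- the running-best bump step both characterisations reduce to
def bump (b : Option (String × Int)) (c : String × Int) : Option (String × Int) :=
  match b with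
  | none => some c
  | some x => if c.2 > x.2 then some c else some x

-- 'Desktop' in r implies 'desktop' in r.lower(), so A's double test equals B's single one.
theorem desktop_cond (r : String) :
    (PySem.Str.isIn "Desktop" r || PySem.Str.isIn "desktop" (PySem.Str.lower r))
      = altIsDesktop r := by
  unfold altIsDesktop
  cases h : PySem.Str.isIn "Desktop" r with
  | false => rw [Bool.false_or]
  | true =>
    have h' := (PySem.Str.isIn_iff_infix _ _).mp h
    have h2 : PySem.Str.isIn "desktop" (PySem.Str.lower r) = true := by
      rw [PySem.Str.isIn_iff_infix, PySem.Str.toList_lower, PySem.Chars.lower]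
      have hm := h'.map PySem.Chars.lowerChar
      have e : List.map PySem.Chars.lowerChar "Desktop".toList = "desktop".toList := by decide
      rwa [e] at hm
    rw [h2, Bool.true_or]

-- head of PySem's insertBy for the descending order, phrased as the bump step
theorem head?_insertBy_rev {α κ : Type} [LT κ] [DecidableLT κ] (key : α → κ) (x : α) (ys : List α) :
    (PySem.List.insertBy (fun a b => decide (key b < key a)) x ys).head?
      = some (match ys with
              | [] => x
              | h :: _ => if key h < key x then x else h) := by
  cases ys with
  | nil => rfl
  | cons h t =>
    simp only [PySem.List.insertBy]
    split_ifs with hc <;> simp_all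

-- head of the stable descending sort after appending one candidate = one bump step
theorem sorted_head_append (cands : List (String × Int)) (c : String × Int) :
    (PySem.List.sorted (cands ++ [c]) (fun x => x.2) true).head?
      = bump (PySem.List.sorted cands (fun x => x.2) true).head? c := by
  rw [PySem.List.sorted_rev_eq_foldl_insertBy, PySem.List.sorted_rev_eq_foldl_insertBy,
      List.foldl_append, List.foldl_cons, List.foldl_nil]
  rw [head?_insertBy_rev (fun x : String × Int => x.2)]
  cases hs : List.foldl (fun acc x => PySem.List.insertBy (fun a b => decide (b.2 < a.2)) x acc)
      [] cands with
  | nil => rfl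
  | cons h t =>
    simp only [List.head?_cons, bump, gt_iff_lt]
    exact apply_ite some _ c h

-- the head of the stable descending sort is the left fold of the bump step
theorem sorted_head_eq_foldl_bump (cs : List (String × Int)) :
    (PySem.List.sorted cs (fun x => x.2) true).head? = cs.foldl bump none := by
  induction cs using List.reverseRecOn with
  | nil => rfl
  | append_singleton cs c ih => rw [sorted_head_append, ih, List.foldl_append, List.foldl_cons, List.foldl_nil]

theorem init_le_foldl_max (xs : List Int) (x : Int) : x ≤ xs.foldl max x := by
  induction xs generalizing x with
  | nil => simp
  | cons y t ih => exact le_trans (le_max_left x y) (ih (max x y))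

-- merging the first two elements by one bump step leaves B's staged result unchanged
theorem stagedBest_merge (b c : String × Int) (cs : List (String × Int)) :
    stagedBest (b :: c :: cs) = stagedBest ((if c.2 > b.2 then c else b) :: cs) := by
  unfold stagedBest
  rw [List.map_cons, List.map_cons, PySem.List.max?_id_cons, List.map_cons,
      PySem.List.max?_id_cons, List.foldl_cons]
  have hsnd : (if c.2 > b.2 then c else b).2 = max b.2 c.2 := by
    by_cases h : b.2 < c.2
    · simp [h, max_eq_right h.le]
    · simp [gt_iff_lt, h, max_eq_left (not_lt.mp h)]
  rw [← hsnd]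
  set m := (cs.map Prod.snd).foldl max (if c.2 > b.2 then c else b).2 with hm
  have hle : (if c.2 > b.2 then c else b).2 ≤ m := init_le_foldl_max _ _
  have hbc : b.2 ≤ m ∧ c.2 ≤ m := by
    by_cases h : b.2 < c.2
    · rw [if_pos h] at hle; omega
    · rw [if_neg h] at hle; omega
  show List.find? (fun p => p.2 == m) (b :: c :: cs)
      = List.find? (fun p => p.2 == m) ((if c.2 > b.2 then c else b) :: cs)
  by_cases h : b.2 < c.2
  · -- the bump keeps c; b.2 < c.2 ≤ m, so b never matches the max
    rw [if_pos h, List.find?_cons_of_neg (by simp; omega)]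
  · -- the bump keeps b
    rw [if_neg h]
    by_cases hbm : b.2 = m
    · rw [List.find?_cons_of_pos (by simp [hbm]), List.find?_cons_of_pos (by simp [hbm])]
    · rw [List.find?_cons_of_neg (by simp [hbm]), List.find?_cons_of_neg (by simp; omega),
          List.find?_cons_of_neg (by simp [hbm])]

-- the bump fold computes B's staged result
theorem foldl_bump_eq_stagedBest (cs : List (String × Int)) :
    ∀ b : String × Int, cs.foldl bump (some b) = stagedBest (b :: cs) := by
  induction cs with
  | nil =>
    intro b
    simp [stagedBest, PySem.List.max?_id_cons]
  | cons c t ih =>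
    intro b
    rw [List.foldl_cons, stagedBest_merge]
    have hb : bump (some b) c = some (if c.2 > b.2 then c else b) := by
      simp only [bump]; exact (apply_ite some _ c b).symm
    rw [hb, ih]

theorem foldl_bump_none (cs : List (String × Int)) : cs.foldl bump none = stagedBest cs := by
  cases cs with
  | nil => rfl
  | cons c t => rw [List.foldl_cons]; exact foldl_bump_eq_stagedBest t c

-- A's loop characterised by B's stages: early find?, else head of sort of all
-- accumulated-so-far plus remaining eligible counts
theorem go_characterisation (l : List (String × List Int)) :
    ∀ cands, find_desktop_resolution_go l cands
      = match l.find? (fun p => altIsDesktop p.1 && decide (p.2 ≠ [])) with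
        | some p => some p.1
        | none => (PySem.List.sorted (cands ++ eligCounts l) (fun x => x.2) true).head?.map Prod.fst := by
  induction l with
  | nil =>
    intro cands
    simp only [find_desktop_resolution_go, List.find?_nil, eligCounts, List.filter_nil,
      List.map_nil, List.append_nil]
    cases PySem.List.sorted cands (fun x => x.2) true <;> rfl
  | cons p rest ih =>
    intro cands
    obtain ⟨resolution, items⟩ := p
    simp only [find_desktop_resolution_go]
    rw [desktop_cond]
    have hec : eligCounts ((resolution, items) :: rest)
        = if decide (items ≠ []) || altIsDesktop resolution
          then (resolution, (items.length : Int)) :: eligCounts rest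
          else eligCounts rest := by
      simp only [eligCounts, List.filter_cons]
      split <;> simp_all
    by_cases hd : altIsDesktop resolution = true
    · rw [if_pos hd]
      by_cases hit : items = []
      · have hne : ¬ items ≠ [] := by simpa using hit
        rw [if_neg hne, ih, List.find?_cons]
        have : (altIsDesktop resolution && decide (items ≠ [])) = false := by
          simp [hit]
        rw [this, hec]
        simp [hd, hit, List.append_assoc]
      · rw [if_pos hit, List.find?_cons]
        have : (altIsDesktop resolution && decide (items ≠ [])) = true := by
          simp [hd, hit]
        rw [this]
    · rw [if_neg hd]
      have hdf : altIsDesktop resolution = false := by simpa using hd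
      by_cases hit : items = []
      · have hne : ¬ items ≠ [] := by simpa using hit
        rw [if_neg hne, ih, List.find?_cons]
        have : (altIsDesktop resolution && decide (items ≠ [])) = false := by
          simp [hdf]
        rw [this, hec]
        simp [hdf, hit]
      · rw [if_pos hit, ih, List.find?_cons]
        have : (altIsDesktop resolution && decide (items ≠ [])) = false := by
          simp [hdf]
        rw [this, hec]
        simp [hit, List.append_assoc]

-- ===== VERDICT (by name: the statement is the Claim_ definition above) =====
theorem find_desktop_resolution_spec : Claim_equal_find_desktop_resolution := by
  intro l _
  unfold Spec_find_desktop_resolution find_desktop_resolution find_desktop_resolution_alt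
  rw [go_characterisation l []]
  cases hf : l.find? (fun p => altIsDesktop p.1 && decide (p.2 ≠ [])) with
  | some p => rfl
  | none =>
    simp only [List.nil_append]
    rw [sorted_head_eq_foldl_bump, foldl_bump_none]
    unfold stagedBest eligCounts
    cases h : PySem.List.max? (((l.filter (fun p => decide (p.2 ≠ []) || altIsDesktop p.1)).map
        (fun p => (p.1, (p.2.length : Int)))).map Prod.snd) (fun y => y) with
    | none => simp
    | some best => simp
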